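-- pv_equiv track=rewrite | github.com/Kenta-Han/TouristSpot | cgi-bin/analogy_imecs/mypackage/category.py | Spot_set_by_level
-- ===== SOURCE A (Python) =====
-- def Spot_set_by_level(cate_vispot,cate_unspot):
--     level1,level2,level3 = [],[],[]
--     for i in range(len(cate_unspot)):
--         for j in range(len(cate_vispot)):
--             if cate_unspot[i][1] == cate_vispot[j][1]:
--                 if cate_unspot[i][2] == cate_vispot[j][2]:
--                     if cate_unspot[i][3] == cate_vispot[j][3]:
--                         level3.append([cate_unspot[i][0],cate_vispot[j][0]])
--                     else:
--                         level2.append([cate_unspot[i][0],cate_vispot[j][0]])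
--                 else:
--                     level1.append([cate_unspot[i][0],cate_vispot[j][0]])
--             else:
--                 continue
--     return level1,level2,level3
-- ===== SOURCE B (Python) =====
-- def Spot_set_by_level(cate_vispot, cate_unspot):
--     # Staged pipeline: first collect all category-matching (unspot, vispot)
--     # pairs in A's nesting order, then split them into the three levels by
--     # simple filters, instead of classifying inside one nested loop.
--     pairs = [(u, v) for u in cate_unspot for v in cate_vispot if u[1] == v[1]]
--     level1 = [[u[0], v[0]] for (u, v) in pairs if u[2] != v[2]]
--     level2 = [[u[0], v[0]] for (u, v) in pairs if u[2] == v[2] and u[3] != v[3]]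
--     level3 = [[u[0], v[0]] for (u, v) in pairs if u[2] == v[2] and u[3] == v[3]]
--     return level1, level2, level3
-- ===== Notes on version B (the rewrite author's own statement) =====
-- stated objective: alternative
-- what changed: B is a staged pipeline: one pass builds the list of category-matching (unspot,vispot) pairs, then three simple filters split that list into the levels, replacing A's single nested loop that classifies and appends with a three-way branch inside it.
import Mathlib
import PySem

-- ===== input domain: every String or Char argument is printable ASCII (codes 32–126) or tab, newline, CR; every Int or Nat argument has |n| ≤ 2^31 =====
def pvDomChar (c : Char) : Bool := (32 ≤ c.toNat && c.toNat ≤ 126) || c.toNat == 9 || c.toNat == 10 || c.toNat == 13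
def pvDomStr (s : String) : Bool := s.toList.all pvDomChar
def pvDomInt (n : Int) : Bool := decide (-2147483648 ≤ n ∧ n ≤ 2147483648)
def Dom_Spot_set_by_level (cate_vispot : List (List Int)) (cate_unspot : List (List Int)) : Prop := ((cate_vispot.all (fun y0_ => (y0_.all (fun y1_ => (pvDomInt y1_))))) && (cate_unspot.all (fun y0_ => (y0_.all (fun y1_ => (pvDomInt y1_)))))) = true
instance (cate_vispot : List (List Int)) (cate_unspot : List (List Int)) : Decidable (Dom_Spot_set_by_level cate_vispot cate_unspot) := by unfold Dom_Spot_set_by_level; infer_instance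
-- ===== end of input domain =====

-- B replaces A's single nested classify-and-append loop by a staged pipeline: collect the
-- category-matching pairs once, then split them into the three levels with simple filters
-- (alternative decomposition, same cost).

-- ===== PORT A =====
-- A: nested index loops over range(len(cate_unspot)) × range(len(cate_vispot)).
-- pyGetD defaults ([] / 0) stand for indexing that is in range under Pre_ (outside Pre_ Python raises).
def Spot_set_by_level (cate_vispot : List (List Int)) (cate_unspot : List (List Int)) : List (List Int) × List (List Int) × List (List Int) :=
  (PySem.List.pyRange 0 (cate_unspot.length : Int) 1).foldl (fun st i =>
    (PySem.List.pyRange 0 (cate_vispot.length : Int) 1).foldl (fun st j =>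
      let u := PySem.List.pyGetD cate_unspot i []
      let v := PySem.List.pyGetD cate_vispot j []
      if PySem.List.pyGetD u 1 0 = PySem.List.pyGetD v 1 0 then
        if PySem.List.pyGetD u 2 0 = PySem.List.pyGetD v 2 0 then
          if PySem.List.pyGetD u 3 0 = PySem.List.pyGetD v 3 0 then
            (st.1, st.2.1, st.2.2 ++ [[PySem.List.pyGetD u 0 0, PySem.List.pyGetD v 0 0]])
          else
            (st.1, st.2.1 ++ [[PySem.List.pyGetD u 0 0, PySem.List.pyGetD v 0 0]], st.2.2)
        else
          (st.1 ++ [[PySem.List.pyGetD u 0 0, PySem.List.pyGetD v 0 0]], st.2.1, st.2.2)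
      else st) st) ([], [], [])

-- ===== PORT B =====
-- B: pairs = [(u,v) for u in uns for v in vis if u[1]==v[1]]; then three filter/map
-- comprehensions split the pair list into the levels.
def Spot_set_by_level_alt (cate_vispot : List (List Int)) (cate_unspot : List (List Int)) : List (List Int) × List (List Int) × List (List Int) :=
  let pairs : List (List Int × List Int) :=
    cate_unspot.flatMap (fun u =>
      (cate_vispot.filter (fun v => PySem.List.pyGetD u 1 0 == PySem.List.pyGetD v 1 0)).map (fun v => (u, v)))
  let level1 := (pairs.filter (fun p => PySem.List.pyGetD p.1 2 0 != PySem.List.pyGetD p.2 2 0)).map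
      (fun p => [PySem.List.pyGetD p.1 0 0, PySem.List.pyGetD p.2 0 0])
  let level2 := (pairs.filter (fun p => PySem.List.pyGetD p.1 2 0 == PySem.List.pyGetD p.2 2 0 &&
        PySem.List.pyGetD p.1 3 0 != PySem.List.pyGetD p.2 3 0)).map
      (fun p => [PySem.List.pyGetD p.1 0 0, PySem.List.pyGetD p.2 0 0])
  let level3 := (pairs.filter (fun p => PySem.List.pyGetD p.1 2 0 == PySem.List.pyGetD p.2 2 0 &&
        PySem.List.pyGetD p.1 3 0 == PySem.List.pyGetD p.2 3 0)).map
      (fun p => [PySem.List.pyGetD p.1 0 0, PySem.List.pyGetD p.2 0 0])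
  (level1, level2, level3)

-- ===== PRECONDITION & SPEC =====
-- Pre_ is exactly the inputs where Python A (and B) return without IndexError: whenever both lists
-- are nonempty every row needs field 1, matching pairs also need field 2, and pairs matching on
-- fields 1 and 2 also need field 3.
def Pre_Spot_set_by_level (cate_vispot : List (List Int)) (cate_unspot : List (List Int)) : Prop :=
  ∀ u ∈ cate_unspot, ∀ v ∈ cate_vispot,
    2 ≤ u.length ∧ 2 ≤ v.length ∧
    (PySem.List.pyGetD u 1 0 = PySem.List.pyGetD v 1 0 →
      (3 ≤ u.length ∧ 3 ≤ v.length ∧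
        (PySem.List.pyGetD u 2 0 = PySem.List.pyGetD v 2 0 → 4 ≤ u.length ∧ 4 ≤ v.length)))
instance (cate_vispot : List (List Int)) (cate_unspot : List (List Int)) : Decidable (Pre_Spot_set_by_level cate_vispot cate_unspot) := by unfold Pre_Spot_set_by_level; infer_instance

def pvWitness_Spot_set_by_level : List (List Int) × List (List Int) :=
  ([[1, 10, 20, 30], [2, 10, 21, 30], [3, 11, 5]], [[7, 10, 20, 30], [8, 12]])

def Spec_Spot_set_by_level (cate_vispot : List (List Int)) (cate_unspot : List (List Int)) (out : List (List Int) × List (List Int) × List (List Int)) : Prop := out = Spot_set_by_level_alt cate_vispot cate_unspot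
instance (cate_vispot : List (List Int)) (cate_unspot : List (List Int)) (out : List (List Int) × List (List Int) × List (List Int)) : Decidable (Spec_Spot_set_by_level cate_vispot cate_unspot out) := by unfold Spec_Spot_set_by_level; infer_instance

-- ===== CLAIM =====
def Claim_equal_Spot_set_by_level : Prop := ∀ (cate_vispot : List (List Int)) (cate_unspot : List (List Int)), Dom_Spot_set_by_level cate_vispot cate_unspot → Pre_Spot_set_by_level cate_vispot cate_unspot → Spec_Spot_set_by_level cate_vispot cate_unspot (Spot_set_by_level cate_vispot cate_unspot)

-- ===== LEMMAS AND PROOFS =====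

-- the pair appended to a level
def pvPr (u v : List Int) : List Int := [PySem.List.pyGetD u 0 0, PySem.List.pyGetD v 0 0]
-- what each level receives from one (u,v) pair
def pvE1 (u v : List Int) : List (List Int) :=
  if PySem.List.pyGetD u 1 0 = PySem.List.pyGetD v 1 0 ∧ ¬ PySem.List.pyGetD u 2 0 = PySem.List.pyGetD v 2 0 then [pvPr u v] else []
def pvE2 (u v : List Int) : List (List Int) :=
  if PySem.List.pyGetD u 1 0 = PySem.List.pyGetD v 1 0 ∧ PySem.List.pyGetD u 2 0 = PySem.List.pyGetD v 2 0 ∧ ¬ PySem.List.pyGetD u 3 0 = PySem.List.pyGetD v 3 0 then [pvPr u v] else []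
def pvE3 (u v : List Int) : List (List Int) :=
  if PySem.List.pyGetD u 1 0 = PySem.List.pyGetD v 1 0 ∧ PySem.List.pyGetD u 2 0 = PySem.List.pyGetD v 2 0 ∧ PySem.List.pyGetD u 3 0 = PySem.List.pyGetD v 3 0 then [pvPr u v] else []

-- a fold whose step appends to all three components distributes into three flatMaps
theorem foldl_append3 {α R : Type} (a b c : α → List R) (l : List α)
    (st : List R × List R × List R) :
    l.foldl (fun st x => (st.1 ++ a x, st.2.1 ++ b x, st.2.2 ++ c x)) st
      = (st.1 ++ l.flatMap a, st.2.1 ++ l.flatMap b, st.2.2 ++ l.flatMap c) := by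
  induction l generalizing st with
  | nil => simp
  | cons x xs ih => simp [ih, List.flatMap_cons]

-- filter-then-map as a flatMap of conditional singletons
theorem filter_map_eq_flatMap {α R : Type} (p : α → Bool) (f : α → R) (l : List α) :
    (l.filter p).map f = l.flatMap (fun x => if p x then [f x] else []) := by
  induction l with
  | nil => rfl
  | cons x xs ih => by_cases h : p x <;> simp [h, ih]

theorem A_eq_normal (vis uns : List (List Int)) :
    Spot_set_by_level vis uns
      = (uns.flatMap (fun u => vis.flatMap (pvE1 u)),
         uns.flatMap (fun u => vis.flatMap (pvE2 u)),
         uns.flatMap (fun u => vis.flatMap (pvE3 u))) := by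
  unfold Spot_set_by_level
  rw [PySem.List.foldl_pyRange_zero_pyGetD' uns ([] : List Int)
        (fun st u =>
          (PySem.List.pyRange 0 (vis.length : Int) 1).foldl (fun st j =>
            let v := PySem.List.pyGetD vis j []
            if PySem.List.pyGetD u 1 0 = PySem.List.pyGetD v 1 0 then
              if PySem.List.pyGetD u 2 0 = PySem.List.pyGetD v 2 0 then
                if PySem.List.pyGetD u 3 0 = PySem.List.pyGetD v 3 0 then
                  (st.1, st.2.1, st.2.2 ++ [[PySem.List.pyGetD u 0 0, PySem.List.pyGetD v 0 0]])
                else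
                  (st.1, st.2.1 ++ [[PySem.List.pyGetD u 0 0, PySem.List.pyGetD v 0 0]], st.2.2)
              else
                (st.1 ++ [[PySem.List.pyGetD u 0 0, PySem.List.pyGetD v 0 0]], st.2.1, st.2.2)
            else st) st)
        (([], [], []) : List (List Int) × List (List Int) × List (List Int))]
  have houter : (fun (st : List (List Int) × List (List Int) × List (List Int)) (u : List Int) =>
      (PySem.List.pyRange 0 (vis.length : Int) 1).foldl (fun st j =>
        let v := PySem.List.pyGetD vis j []
        if PySem.List.pyGetD u 1 0 = PySem.List.pyGetD v 1 0 then
          if PySem.List.pyGetD u 2 0 = PySem.List.pyGetD v 2 0 then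
            if PySem.List.pyGetD u 3 0 = PySem.List.pyGetD v 3 0 then
              (st.1, st.2.1, st.2.2 ++ [[PySem.List.pyGetD u 0 0, PySem.List.pyGetD v 0 0]])
            else
              (st.1, st.2.1 ++ [[PySem.List.pyGetD u 0 0, PySem.List.pyGetD v 0 0]], st.2.2)
          else
            (st.1 ++ [[PySem.List.pyGetD u 0 0, PySem.List.pyGetD v 0 0]], st.2.1, st.2.2)
        else st) st)
      = fun st u => (st.1 ++ vis.flatMap (pvE1 u), st.2.1 ++ vis.flatMap (pvE2 u), st.2.2 ++ vis.flatMap (pvE3 u)) := by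
    funext st u
    rw [PySem.List.foldl_pyRange_zero_pyGetD' vis ([] : List Int)
          (fun st v =>
            if PySem.List.pyGetD u 1 0 = PySem.List.pyGetD v 1 0 then
              if PySem.List.pyGetD u 2 0 = PySem.List.pyGetD v 2 0 then
                if PySem.List.pyGetD u 3 0 = PySem.List.pyGetD v 3 0 then
                  (st.1, st.2.1, st.2.2 ++ [[PySem.List.pyGetD u 0 0, PySem.List.pyGetD v 0 0]])
                else
                  (st.1, st.2.1 ++ [[PySem.List.pyGetD u 0 0, PySem.List.pyGetD v 0 0]], st.2.2)
              else
                (st.1 ++ [[PySem.List.pyGetD u 0 0, PySem.List.pyGetD v 0 0]], st.2.1, st.2.2)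
            else st) st]
    have hstep : (fun (st : List (List Int) × List (List Int) × List (List Int)) (v : List Int) =>
        if PySem.List.pyGetD u 1 0 = PySem.List.pyGetD v 1 0 then
          if PySem.List.pyGetD u 2 0 = PySem.List.pyGetD v 2 0 then
            if PySem.List.pyGetD u 3 0 = PySem.List.pyGetD v 3 0 then
              (st.1, st.2.1, st.2.2 ++ [[PySem.List.pyGetD u 0 0, PySem.List.pyGetD v 0 0]])
            else
              (st.1, st.2.1 ++ [[PySem.List.pyGetD u 0 0, PySem.List.pyGetD v 0 0]], st.2.2)
          else
            (st.1 ++ [[PySem.List.pyGetD u 0 0, PySem.List.pyGetD v 0 0]], st.2.1, st.2.2)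
        else st)
        = fun st v => (st.1 ++ pvE1 u v, st.2.1 ++ pvE2 u v, st.2.2 ++ pvE3 u v) := by
      funext st v
      by_cases h1 : PySem.List.pyGetD u 1 0 = PySem.List.pyGetD v 1 0 <;>
        by_cases h2 : PySem.List.pyGetD u 2 0 = PySem.List.pyGetD v 2 0 <;>
        by_cases h3 : PySem.List.pyGetD u 3 0 = PySem.List.pyGetD v 3 0 <;>
        simp [pvE1, pvE2, pvE3, pvPr, h1, h2, h3]
    rw [hstep, foldl_append3]
  rw [houter, foldl_append3]
  simp

theorem B_eq_normal (vis uns : List (List Int)) :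
    Spot_set_by_level_alt vis uns
      = (uns.flatMap (fun u => vis.flatMap (pvE1 u)),
         uns.flatMap (fun u => vis.flatMap (pvE2 u)),
         uns.flatMap (fun u => vis.flatMap (pvE3 u))) := by
  unfold Spot_set_by_level_alt
  simp only [List.filter_flatMap, List.map_flatMap, List.filter_map, List.map_map,
    List.filter_filter]
  refine Prod.ext ?_ (Prod.ext ?_ ?_) <;>
    refine congrArg (fun f => List.flatMap f uns) (funext fun u => ?_) <;>
    rw [filter_map_eq_flatMap] <;>
    refine congrArg (fun f => List.flatMap f vis) (funext fun v => ?_) <;>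
    by_cases h1 : PySem.List.pyGetD u 1 0 = PySem.List.pyGetD v 1 0 <;>
    by_cases h2 : PySem.List.pyGetD u 2 0 = PySem.List.pyGetD v 2 0 <;>
    by_cases h3 : PySem.List.pyGetD u 3 0 = PySem.List.pyGetD v 3 0 <;>
    simp [pvE1, pvE2, pvE3, pvPr, Function.comp, h1, h2, h3]

-- ===== VERDICT =====
theorem Spot_set_by_level_spec : Claim_equal_Spot_set_by_level := by
  intro vis uns _ _
  unfold Spec_Spot_set_by_level
  rw [A_eq_normal, B_eq_normal]
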